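-- pv_equiv track=rewrite | github.com/SGaidi/practice-questions | data-structures/matrix.py | array2spiral_matrix
-- ===== SOURCE A (Python) =====
-- from typing import List
--
-- def array2spiral_matrix(arr: List[int], n: int, m: int) -> List[List[int]]:
-- 	assert n * m == len(arr)
-- 	matrix = []
-- 	for row_idx in range(n):
-- 		if row_idx % 2 == 0:
-- 			matrix.append(arr[row_idx * m:(row_idx + 1) * m ])
-- 		else:
-- 			matrix.append(arr[(row_idx + 1) * m - 1:row_idx * m - 1:-1])
-- 	return matrix
-- ===== SOURCE B (Python) =====
-- def array2spiral_matrix(arr, n, m):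
--     assert n * m == len(arr)
--     matrix = [[0] * m for _ in range(n)]
--     for i in range(len(arr)):
--         r, p = divmod(i, m)
--         matrix[r][p if r % 2 == 0 else m - 1 - p] = arr[i]
--     return matrix
-- ===== Notes on version B (the rewrite author's own statement) =====
-- stated objective: alternative
-- what changed: B replaces A's per-row slicing (forward slice for even rows, negative-step slice for odd rows) by pre-allocating an n-by-m zero matrix and one flat pass over arr that places each element at a computed (row, column) via divmod.
-- outside the precondition, e.g. on array2spiral_matrix([1, 2, 3, 4], -2, -2): A returns [], B raises IndexError
import Mathlib
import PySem

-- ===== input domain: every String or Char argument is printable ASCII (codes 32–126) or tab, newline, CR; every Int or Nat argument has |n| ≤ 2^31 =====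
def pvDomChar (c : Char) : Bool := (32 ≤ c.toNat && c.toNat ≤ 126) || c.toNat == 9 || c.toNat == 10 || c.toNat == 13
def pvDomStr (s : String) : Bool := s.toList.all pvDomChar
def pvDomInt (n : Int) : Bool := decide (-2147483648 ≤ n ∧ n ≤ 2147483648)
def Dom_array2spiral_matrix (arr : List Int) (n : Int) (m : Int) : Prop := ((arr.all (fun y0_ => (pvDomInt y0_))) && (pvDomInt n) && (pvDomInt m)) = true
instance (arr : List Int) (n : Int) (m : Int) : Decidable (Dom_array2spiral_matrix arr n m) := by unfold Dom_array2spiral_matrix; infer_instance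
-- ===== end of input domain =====

-- B pre-allocates an n-by-m zero matrix and fills it in one flat pass over arr,
-- placing arr[i] at row i//m, column i%m (mirrored on odd rows), instead of A's
-- per-row forward / negative-step slices: an alternative decomposition, same cost.


-- ===== PORT A =====
-- literal port of A: for row_idx in range(n), append a forward slice on even rows
-- and the negative-step slice arr[(row_idx+1)*m-1 : row_idx*m-1 : -1] on odd rows
-- (the assert is handled by Pre_; slice? with step -1 is always `some`, hence .getD []).
def array2spiral_matrix (arr : List Int) (n : Int) (m : Int) : List (List Int) :=
  (PySem.List.pyRange 0 n 1).foldl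
    (fun matrix row_idx =>
      if PySem.Int.mod row_idx 2 = 0 then
        matrix ++ [PySem.List.slice arr (some (row_idx * m)) (some ((row_idx + 1) * m))]
      else
        matrix ++ [(PySem.List.slice? arr (some ((row_idx + 1) * m - 1)) (some (row_idx * m - 1)) (-1)).getD []])
    []

-- ===== PORT B =====
-- literal port of Source B: matrix = [[0]*m for _ in range(n)]; for i in range(len(arr)):
-- r, p = divmod(i, m); matrix[r][p if r % 2 == 0 else m-1-p] = arr[i]
-- (the assert is handled by Pre_; the in-range subscripts are ported with pySetD/pyGetD).
def array2spiral_matrix_alt (arr : List Int) (n : Int) (m : Int) : List (List Int) :=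
  (PySem.List.pyRange 0 (arr.length : Int) 1).foldl
    (fun matrix i =>
      let r := PySem.Int.floordiv i m
      let p := PySem.Int.mod i m
      PySem.List.pySetD matrix r
        (PySem.List.pySetD (PySem.List.pyGetD matrix r [])
          (if PySem.Int.mod r 2 = 0 then p else m - 1 - p)
          (PySem.List.pyGetD arr i 0)))
    (List.replicate n.toNat (List.replicate m.toNat 0))

-- ===== PRECONDITION & SPEC =====
-- Pre_ excludes (a) inputs failing A's own assert n*m == len(arr), where A raises
-- AssertionError, and (b) n and m both negative with arr nonempty (the only other
-- sign pattern passing the assert): there A's range(n) artefact returns [] while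
-- B's flat index placement raises IndexError, so B itself does not return.
def Pre_array2spiral_matrix (arr : List Int) (n : Int) (m : Int) : Prop :=
  n * m = arr.length ∧ (0 ≤ n ∧ 0 ≤ m ∨ arr = [] ∧ n ≤ 0)
instance (arr : List Int) (n : Int) (m : Int) : Decidable (Pre_array2spiral_matrix arr n m) := by unfold Pre_array2spiral_matrix; infer_instance
def pvWitness_array2spiral_matrix : List Int × Int × Int := ([1, 2, 3, 4, 5, 6], 2, 3)

def Spec_array2spiral_matrix (arr : List Int) (n : Int) (m : Int) (out : List (List Int)) : Prop := out = array2spiral_matrix_alt arr n m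
instance (arr : List Int) (n : Int) (m : Int) (out : List (List Int)) : Decidable (Spec_array2spiral_matrix arr n m out) := by unfold Spec_array2spiral_matrix; infer_instance

-- ===== CLAIM (what is proved, stated in full; the proofs are below) =====
def Claim_equal_array2spiral_matrix : Prop := ∀ (arr : List Int) (n : Int) (m : Int), Dom_array2spiral_matrix arr n m → Pre_array2spiral_matrix arr n m → Spec_array2spiral_matrix arr n m (array2spiral_matrix arr n m)

-- ===== LEMMAS AND PROOFS =====

-- the common normal form of the result: row k is the k-th chunk, reversed when k is odd
def pvChunk (arr : List Int) (m k : ℕ) : List Int := (arr.drop (k * m)).take m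
def pvRow (arr : List Int) (m k : ℕ) : List Int :=
  if k % 2 = 0 then pvChunk arr m k else (pvChunk arr m k).reverse

-- the nat-level step of B's flat fill loop
def pvFill (arr : List Int) (m : ℕ) (mat : List (List Int)) (i : ℕ) : List (List Int) :=
  mat.set (i / m)
    ((mat.getD (i / m) []).set
      (if (i / m) % 2 = 0 then i % m else m - 1 - i % m) (arr.getD i 0))

-- appending one element per iteration is map
theorem pv_foldl_app {α β : Type} (l : List α) (g : α → β) (acc : List β) :
    l.foldl (fun a x => a ++ [g x]) acc = acc ++ l.map g := by
  induction l generalizing acc with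
  | nil => simp
  | cons x xs ih => simp [List.foldl_cons, ih]

-- the slice xs[e-1 : s-1 : -1] (1 ≤ s ≤ e ≤ len) is the reversed middle chunk
theorem pv_slice_neg_one (xs : List Int) (s e : ℕ) (hs : 0 < s) (hse : s ≤ e)
    (he : e ≤ xs.length) :
    PySem.List.slice? xs (some ((e : Int) - 1)) (some ((s : Int) - 1)) (-1)
      = some (((xs.drop s).take (e - s)).reverse) := by
  unfold PySem.List.slice? PySem.List.sliceIndices
  rw [if_neg (by norm_num)]
  simp only
  rw [if_neg (by omega : ¬ ((e:Int) - 1 < 0)), if_neg (by omega : ¬ ((s:Int) - 1 < 0))]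
  rw [min_eq_left (by omega), min_eq_left (by omega)]
  rw [if_neg (by norm_num : ¬ (0:Int) < -1)]
  by_cases hlt : s < e
  · rw [if_pos (by omega : (s:Int) - 1 < (e:Int) - 1)]
    have hc : (((e:Int) - 1 - ((s:Int) - 1) + - -1 - 1) / - -1).toNat = e - s := by
      norm_num
    rw [hc]
    congr 1
    have hall : ∀ k ∈ List.range (e - s),
        (fun x : ℕ => xs[(((e:Int) - 1) + -1 * (x:Int)).toNat]?) k
          = (fun x : ℕ => some (xs.getD (e - 1 - x) 0)) k := by
      intro k hk
      rw [List.mem_range] at hk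
      beta_reduce
      have hidx : (((e:Int) - 1) + -1 * (k:Int)).toNat = e - 1 - k := by omega
      rw [hidx, List.getElem?_eq_getElem (by omega), List.getD_eq_getElem _ _ (by omega)]
    rw [List.filterMap_congr hall]
    have : (fun x : ℕ => some (xs.getD (e - 1 - x) 0))
        = some ∘ (fun x : ℕ => xs.getD (e - 1 - x) 0) := rfl
    rw [this, List.filterMap_eq_map]
    apply List.ext_getElem
    · simp; omega
    · intro i h1 h2
      simp only [List.getElem_map, List.getElem_range, List.getElem_reverse,
        List.getElem_take, List.getElem_drop]
      simp only [List.length_map, List.length_range] at h1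
      rw [List.getD_eq_getElem _ _ (by omega)]
      congr 1
      simp only [List.length_take, List.length_drop]
      omega
  · have hes : e = s := by omega
    rw [if_neg (by omega : ¬ ((s:Int) - 1 < (e:Int) - 1))]
    simp [hes]

-- a reversed slice of the empty list is empty (the m = 0 rows of A)
theorem pv_slice_nil_neg (a b : Option Int) :
    PySem.List.slice? ([] : List Int) a b (-1) = some [] := by
  unfold PySem.List.slice? PySem.List.sliceIndices
  rw [if_neg (by norm_num)]
  simp

-- filling positions 0..mth-1 left to right
theorem pv_set_fold_even (mth : ℕ) (f : ℕ → Int) :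
    ∀ (row : List Int), mth ≤ row.length →
      (List.range mth).foldl (fun r p => r.set p (f p)) row
        = (List.range mth).map f ++ row.drop mth := by
  induction mth with
  | zero => intro row _; simp
  | succ j ih =>
    intro row hlen
    rw [List.range_succ, List.foldl_append, ih row (by omega)]
    simp only [List.foldl_cons, List.foldl_nil]
    have hj : j < row.length := by omega
    rw [List.set_append_right _ _ (by simp)]
    simp only [List.length_map, List.length_range]
    rw [Nat.sub_self, List.drop_eq_getElem_cons hj, List.set_cons_zero]
    simp [List.map_append]

-- filling positions mth-1..0 right to left gives the reversed map
theorem pv_set_fold_odd (mth : ℕ) :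
    ∀ (f : ℕ → Int) (row : List Int), mth ≤ row.length →
      (List.range mth).foldl (fun r p => r.set (mth - 1 - p) (f p)) row
        = ((List.range mth).map f).reverse ++ row.drop mth := by
  induction mth with
  | zero => intro f row _; simp
  | succ j ih =>
    intro f row hlen
    rw [List.range_succ_eq_map]
    simp only [List.foldl_cons, List.foldl_map]
    have e1 : ∀ p : ℕ, j + 1 - 1 - (p + 1) = j - 1 - p := by omega
    have hj : j < row.length := by omega
    have : (List.foldl (fun (r : List Int) (p : ℕ) => r.set (j + 1 - 1 - (p + 1)) (f (p + 1)))
        (row.set (j + 1 - 1 - 0) (f 0)) (List.range j))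
        = List.foldl (fun (r : List Int) (p : ℕ) => r.set (j - 1 - p) ((fun q => f (q+1)) p))
        (row.set j (f 0)) (List.range j) := by
      simp only [e1]; norm_num
    rw [this, ih (fun q => f (q+1)) (row.set j (f 0)) (by simp; omega)]
    rw [List.drop_set, if_neg (by omega), Nat.sub_self]
    rw [List.drop_eq_getElem_cons hj, List.set_cons_zero]
    rw [List.map_cons, List.map_map, List.reverse_cons]
    simp [Function.comp]

theorem pv_chunk_map (arr : List Int) (m k : ℕ) (h : (k + 1) * m ≤ arr.length) :
    (List.range m).map (fun p => arr.getD (k * m + p) 0) = pvChunk arr m k := by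
  rw [Nat.succ_mul] at h
  apply List.ext_getElem
  · simp [pvChunk]; omega
  · intro i h1 h2
    simp only [pvChunk, List.getElem_map, List.getElem_range, List.getElem_take,
      List.getElem_drop]
    rw [List.getD_eq_getElem _ _ (by simp at h1; omega)]

-- one step of B's loop at flat index k*m'+p lands in row k, column p (or its mirror)
theorem pv_fill_at (arr : List Int) (m' : ℕ) (hm : 0 < m') (k p : ℕ) (hp : p < m')
    (mat : List (List Int)) :
    pvFill arr m' mat (k * m' + p)
      = mat.set k ((mat.getD k []).set (if k % 2 = 0 then p else m' - 1 - p)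
          (arr.getD (k * m' + p) 0)) := by
  have hd : (k * m' + p) / m' = k := by
    rw [Nat.mul_comm k m', Nat.mul_add_div hm, Nat.div_eq_of_lt hp, Nat.add_zero]
  have hmo : (k * m' + p) % m' = p := by
    rw [Nat.mul_comm k m', Nat.mul_add_mod, Nat.mod_eq_of_lt hp]
  simp only [pvFill, hd, hmo]

-- a block of B's loop only rewrites row k
theorem pv_fill_row (arr : List Int) (m' : ℕ) (hm : 0 < m') (k : ℕ) :
    ∀ (ps : List ℕ) (mat : List (List Int)), (∀ p ∈ ps, p < m') → k < mat.length →
      (ps.map (fun p => k * m' + p)).foldl (pvFill arr m') mat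
        = mat.set k (ps.foldl
            (fun row p => row.set (if k % 2 = 0 then p else m' - 1 - p)
              (arr.getD (k * m' + p) 0)) (mat.getD k [])) := by
  intro ps
  induction ps with
  | nil =>
    intro mat _ hk
    simp only [List.map_nil, List.foldl_nil]
    rw [List.getD_eq_getElem _ _ hk, List.set_getElem_self hk]
  | cons p ps ih =>
    intro mat hps hk
    simp only [List.map_cons, List.foldl_cons]
    rw [pv_fill_at arr m' hm k p (hps p (by simp)) mat]
    rw [ih _ (fun q hq => hps q (by simp [hq])) (by simpa using hk)]
    rw [List.set_set]
    congr 1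
    congr 1
    rw [List.getD_eq_getElem?_getD, List.getElem?_set_self (by simpa using hk)]
    simp

-- after k full blocks of B's loop the first k rows are final, the rest still blank
theorem pv_outer (arr : List Int) (n' m' : ℕ) (hm : 0 < m') (hL : arr.length = n' * m') :
    ∀ k, k ≤ n' →
      (List.range (k * m')).foldl (pvFill arr m') (List.replicate n' (List.replicate m' 0))
        = (List.range k).map (pvRow arr m') ++ List.replicate (n' - k) (List.replicate m' 0) := by
  intro k
  induction k with
  | zero => intro _; simp
  | succ k ih =>
    intro hk1
    have hk : k < n' := by omega
    rw [Nat.succ_mul, List.range_add, List.foldl_append, ih (by omega)]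
    rw [pv_fill_row arr m' hm k (List.range m') _ (fun p hp => by simpa using hp)
        (by simp; omega)]
    have hgd : ((List.range k).map (pvRow arr m')
        ++ List.replicate (n' - k) (List.replicate m' 0)).getD k [] = List.replicate m' 0 := by
      rw [List.getD_eq_getElem?_getD, List.getElem?_append_right (by simp)]
      simp only [List.length_map, List.length_range, Nat.sub_self]
      rw [List.getElem?_replicate]
      rw [if_pos (by omega)]
      rfl
    rw [hgd]
    have hchunk : (k + 1) * m' ≤ arr.length := by
      rw [hL]; exact Nat.mul_le_mul_right m' hk1
    have hrow : (List.range m').foldl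
        (fun row p => row.set (if k % 2 = 0 then p else m' - 1 - p)
          (arr.getD (k * m' + p) 0)) (List.replicate m' 0) = pvRow arr m' k := by
      by_cases hpar : k % 2 = 0
      · simp only [if_pos hpar]
        rw [pv_set_fold_even m' (fun p => arr.getD (k * m' + p) 0) _ (by simp)]
        rw [pv_chunk_map arr m' k hchunk]
        simp [pvRow, hpar]
      · simp only [if_neg hpar]
        rw [pv_set_fold_odd m' (fun p => arr.getD (k * m' + p) 0) _ (by simp)]
        rw [pv_chunk_map arr m' k hchunk]
        simp [pvRow, hpar]
    rw [hrow]
    rw [List.set_append_right _ _ (by simp)]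
    simp only [List.length_map, List.length_range, Nat.sub_self]
    rw [show n' - k = (n' - (k + 1)) + 1 by omega, List.replicate_succ, List.set_cons_zero]
    rw [List.range_succ, List.map_append]
    simp

-- A evaluates to the normal form
theorem pv_A_eval (arr : List Int) (n m : Int) (hmul : n * m = arr.length)
    (hn : 0 ≤ n) (hm : 0 ≤ m) :
    array2spiral_matrix arr n m = (List.range n.toNat).map (pvRow arr m.toNat) := by
  set n' := n.toNat with hn'
  set m' := m.toNat with hm'
  have hneq : n = (n' : Int) := by omega
  have hmeq : m = (m' : Int) := by omega
  have hL : arr.length = n' * m' := by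
    have : (arr.length : Int) = (n' : Int) * (m' : Int) := by rw [← hneq, ← hmeq, hmul]
    exact_mod_cast this
  unfold array2spiral_matrix
  rw [hneq, PySem.List.pyRange_zero_natCast n', List.foldl_map]
  rw [PySem.List.foldl_congr_mem _ _
    (fun (a : List (List Int)) (k : ℕ) => a ++
      [if PySem.Int.mod (k : Int) 2 = 0 then
        PySem.List.slice arr (some ((k : Int) * m)) (some (((k : Int) + 1) * m))
      else
        (PySem.List.slice? arr (some (((k : Int) + 1) * m - 1)) (some ((k : Int) * m - 1)) (-1)).getD []]) _
    (by intro acc k _; beta_reduce; split_ifs <;> rfl)]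
  rw [pv_foldl_app]
  rw [List.nil_append]
  apply List.map_congr_left
  intro k hk
  rw [List.mem_range] at hk
  have h2 : PySem.Int.mod (k : Int) 2 = ((k % 2 : ℕ) : Int) := by
    exact_mod_cast PySem.Int.mod_natCast k 2
  by_cases hpar : k % 2 = 0
  · rw [if_pos (by rw [h2, hpar]; rfl)]
    have e1 : ((k : Int) * m) = ((k * m' : ℕ) : Int) := by rw [hmeq]; push_cast; ring
    have e2 : (((k : Int) + 1) * m) = ((k * m' : ℕ) : Int) + ((m' : ℕ) : Int) := by
      rw [hmeq]; push_cast; ring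
    rw [e1, e2, PySem.List.slice_natCast_add]
    rw [pvRow, if_pos hpar]; rfl
  · rw [if_neg (by rw [h2]; intro hc; exact hpar (by exact_mod_cast hc))]
    have hk1 : 1 ≤ k := by omega
    by_cases hm0 : m' = 0
    · have harr : arr = [] := by
        apply List.length_eq_zero_iff.mp
        rw [hL, hm0, Nat.mul_zero]
      subst harr
      rw [pv_slice_nil_neg]
      simp [pvRow, pvChunk, hpar, hm0]
    · have hmpos : 0 < m' := Nat.pos_of_ne_zero hm0
      have e3 : (((k : Int) + 1) * m - 1) = (((k + 1) * m' : ℕ) : Int) - 1 := by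
        rw [hmeq]; push_cast; ring
      have e4 : ((k : Int) * m - 1) = ((k * m' : ℕ) : Int) - 1 := by
        rw [hmeq]; push_cast; ring
      rw [e3, e4, pv_slice_neg_one arr (k * m') ((k + 1) * m')
        (Nat.mul_pos hk1 hmpos)
        (Nat.mul_le_mul_right m' (by omega))
        (by rw [hL]; exact Nat.mul_le_mul_right m' (by omega))]
      rw [Option.getD_some]
      rw [pvRow, if_neg hpar]
      have : (k + 1) * m' - k * m' = m' := by rw [Nat.succ_mul]; omega
      rw [this]; rfl

-- B evaluates to the normal form
theorem pv_B_eval (arr : List Int) (n m : Int) (hmul : n * m = arr.length)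
    (hn : 0 ≤ n) (hm : 0 ≤ m) :
    array2spiral_matrix_alt arr n m = (List.range n.toNat).map (pvRow arr m.toNat) := by
  obtain ⟨m', rfl⟩ : ∃ m' : ℕ, m = (m' : Int) := ⟨m.toNat, by omega⟩
  obtain ⟨n', rfl⟩ : ∃ n' : ℕ, n = (n' : Int) := ⟨n.toNat, by omega⟩
  simp only [Int.toNat_natCast]
  have hL : arr.length = n' * m' := by
    have : (arr.length : Int) = ((n' * m' : ℕ) : Int) := by push_cast; omega
    exact_mod_cast this
  unfold array2spiral_matrix_alt
  simp only [Int.toNat_natCast]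
  rw [PySem.List.pyRange_zero_natCast arr.length, List.foldl_map]
  by_cases hm0 : m' = 0
  · subst hm0
    have hlen0 : arr.length = 0 := by omega
    rw [hlen0]
    simp only [List.range_zero, List.foldl_nil, List.replicate_zero]
    apply List.ext_getElem
    · simp
    · intro i h1 h2
      simp [pvRow, pvChunk]
  · have hmpos : 0 < m' := Nat.pos_of_ne_zero hm0
    rw [PySem.List.foldl_congr_mem _ _ (pvFill arr m') _ ?hkey]
    · rw [hL, pv_outer arr n' m' hmpos hL n' (Nat.le_refl _)]
      simp
    case hkey =>
      intro acc i hi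
      rw [List.mem_range, hL] at hi
      beta_reduce
      rw [PySem.Int.floordiv_natCast i m', PySem.Int.mod_natCast i m']
      have h2 : PySem.Int.mod ((i / m' : ℕ) : Int) 2 = (((i / m') % 2 : ℕ) : Int) := by
        exact_mod_cast PySem.Int.mod_natCast (i / m') 2
      rw [h2]
      have hplt : i % m' < m' := Nat.mod_lt i hmpos
      by_cases hpar : (i / m') % 2 = 0
      · rw [if_pos (by exact_mod_cast congrArg (Nat.cast : ℕ → Int) hpar)]
        rw [PySem.List.pyGetD_natCast, PySem.List.pyGetD_natCast,
            PySem.List.pySetD_natCast, PySem.List.pySetD_natCast]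
        simp [pvFill, hpar]
      · rw [if_neg (by intro hc; exact hpar (by exact_mod_cast hc))]
        have hodd : ((m' : Int) - 1 - ((i % m' : ℕ) : Int))
            = ((m' - 1 - i % m' : ℕ) : Int) := by push_cast; omega
        rw [hodd]
        rw [PySem.List.pyGetD_natCast, PySem.List.pyGetD_natCast,
            PySem.List.pySetD_natCast, PySem.List.pySetD_natCast]
        simp [pvFill, hpar]

-- ===== VERDICT (by name: the statement is the Claim_ definition above) =====
theorem array2spiral_matrix_spec : Claim_equal_array2spiral_matrix := by
  intro arr n m _ hpre
  unfold Spec_array2spiral_matrix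
  obtain ⟨hmul, hor⟩ := hpre
  rcases hor with ⟨hn, hm⟩ | ⟨harr, hn0⟩
  · rw [pv_A_eval arr n m hmul hn hm, pv_B_eval arr n m hmul hn hm]
  · subst harr
    unfold array2spiral_matrix array2spiral_matrix_alt
    rw [PySem.List.pyRange_one_eq_nil (by omega : n ≤ 0)]
    simp only [List.length_nil, Int.natCast_zero]
    rw [PySem.List.pyRange_one_eq_nil (by omega : (0:Int) ≤ 0)]
    simp only [List.foldl_nil]
    rw [show n.toNat = 0 by omega]
    simp
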